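-- pv_equiv track=rewrite | github.com/eliottcassidy2000/math | 04-computation/h_positivity_test.py | h_at_m
-- ===== SOURCE A (Python) =====
-- from math import factorial
--
-- def h_at_m(partition, m):
--     """Compute ps^1(h_lambda)(m) = prod C(m+lambda_i-1, lambda_i)."""
--     result = 1
--     for part in partition:
--         # C(m+part-1, part) = prod_{j=0}^{part-1} (m+j) / part!
--         num = 1
--         for j in range(part):
--             num *= (m + j)
--         num //= factorial(part)
--         result *= num
--     return result
-- ===== SOURCE B (Python) =====
-- from math import comb
--
-- def h_at_m(partition, m):
--     """Compute ps^1(h_lambda)(m) = prod C(m+lambda_i-1, lambda_i)."""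
--     result = 1
--     for k in partition:
--         if m >= 1:
--             result *= comb(m + k - 1, k)
--         elif m + k <= 0:
--             result *= (-1) ** k * comb(-m, k)
--         else:
--             result = 0
--     return result
-- ===== Notes on version B (the rewrite author's own statement) =====
-- stated objective: alternative
-- what changed: The inner numerator loop and factorial division are replaced by a loop-free sign-split closed form per part: math.comb(m+k-1,k) for m >= 1, (-1)**k * comb(-m,k) for m+k <= 0, and 0 in between.
import Mathlib
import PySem

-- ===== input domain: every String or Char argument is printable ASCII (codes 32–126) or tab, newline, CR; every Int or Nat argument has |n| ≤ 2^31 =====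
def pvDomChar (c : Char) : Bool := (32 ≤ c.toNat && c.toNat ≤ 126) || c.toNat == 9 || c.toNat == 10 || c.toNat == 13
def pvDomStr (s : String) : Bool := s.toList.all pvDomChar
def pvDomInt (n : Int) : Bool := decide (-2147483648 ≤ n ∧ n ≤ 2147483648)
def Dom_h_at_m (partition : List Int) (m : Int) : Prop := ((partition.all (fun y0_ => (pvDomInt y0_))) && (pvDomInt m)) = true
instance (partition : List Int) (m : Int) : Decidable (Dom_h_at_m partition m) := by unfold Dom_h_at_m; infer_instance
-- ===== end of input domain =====

-- B replaces A's inner loop + factorial division by a loop-free sign-split closed form: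
-- math.comb for m ≥ 1, (-1)^k * comb(-m, k) for m+k ≤ 0, and 0 in between (alternative decomposition).

-- ===== PORT A =====
-- math.factorial ported via Mathlib's Nat.factorial; exact for n ≥ 0 (Pre_ excludes negative parts,
-- on which math.factorial raises ValueError).
def pyFactorial (n : Int) : Int := (Nat.factorial n.toNat : Int)

def h_at_m (partition : List Int) (m : Int) : Int :=
  partition.foldl (fun result part =>
    let num := (PySem.List.pyRange 0 part 1).foldl (fun num j => num * (m + j)) 1
    let num := PySem.Int.floordiv num (pyFactorial part)
    result * num) 1

-- ===== PORT B =====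
-- math.comb n k ported as Nat.choose (exact for 0 ≤ n, 0 ≤ k; Pre_ excludes negative parts,
-- on which math.comb raises ValueError).
def h_at_m_alt (partition : List Int) (m : Int) : Int :=
  partition.foldl (fun result k =>
    if 1 ≤ m then result * (((m + k - 1).toNat.choose k.toNat : Nat) : Int)
    else if m + k ≤ 0 then result * ((-1) ^ k.toNat * (((-m).toNat.choose k.toNat : Nat) : Int))
    else 0) 1

-- ===== PRECONDITION & SPEC =====
-- Pre_ excludes exactly the inputs where A raises: a negative part makes math.factorial raise ValueError.
def Pre_h_at_m (partition : List Int) (m : Int) : Prop := ∀ p ∈ partition, 0 ≤ p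
instance (partition : List Int) (m : Int) : Decidable (Pre_h_at_m partition m) := by unfold Pre_h_at_m; infer_instance
def pvWitness_h_at_m : List Int × Int := ([2, 1], 3)

def Spec_h_at_m (partition : List Int) (m : Int) (out : Int) : Prop := out = h_at_m_alt partition m
instance (partition : List Int) (m : Int) (out : Int) : Decidable (Spec_h_at_m partition m out) := by unfold Spec_h_at_m; infer_instance

-- ===== CLAIM (what is proved, stated in full; the proofs are below) =====
def Claim_equal_h_at_m : Prop := ∀ (partition : List Int) (m : Int), Dom_h_at_m partition m → Pre_h_at_m partition m → Spec_h_at_m partition m (h_at_m partition m)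

-- ===== LEMMAS AND PROOFS =====

-- numerator product prod_{j<n} (m+j), as a Nat recursion
def pfold (m : Int) : Nat → Int
  | 0 => 1
  | n + 1 => pfold m n * (m + n)

theorem pfold_pos (m : Int) (hm : 1 ≤ m) (n : Nat) :
    pfold m n = ((m.toNat.ascFactorial n : Nat) : Int) := by
  induction n with
  | zero => simp [pfold]
  | succ n ih =>
      rw [pfold, ih, Nat.ascFactorial_succ]
      push_cast [Int.toNat_of_nonneg (by omega : (0:Int) ≤ m)]
      ring

theorem pfold_neg (m : Int) (n : Nat) (h : m + n ≤ 0) :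
    pfold m n = (-1) ^ n * (((-m).toNat.descFactorial n : Nat) : Int) := by
  induction n with
  | zero => simp [pfold]
  | succ n ih =>
      have hn : m + n ≤ 0 := by push_cast at h ⊢; omega
      have hk : n ≤ (-m).toNat := by omega
      rw [pfold, ih hn, Nat.descFactorial_succ]
      have : (((-m).toNat - n : Nat) : Int) = -m - n := by omega
      push_cast [this]
      ring

theorem pfold_zero_mem (m : Int) (n : Nat) (h : ∃ j : Nat, j < n ∧ m + j = 0) :
    pfold m n = 0 := by
  induction n with
  | zero => omega
  | succ n ih =>
      obtain ⟨j, hj, hz⟩ := h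
      rcases Nat.lt_succ_iff_lt_or_eq.mp hj with hlt | rfl
      · rw [pfold, ih ⟨j, hlt, hz⟩, zero_mul]
      · rw [pfold, hz, mul_zero]

theorem foldA (m : Int) (n : Nat) :
    (PySem.List.pyRange 0 (n : Int) 1).foldl (fun num j => num * (m + j)) 1 = pfold m n := by
  induction n with
  | zero => simp [PySem.List.pyRange_zero_nat, pfold]
  | succ n ih =>
      rw [Nat.cast_succ, PySem.List.pyRange_one_succ_right (by positivity), List.foldl_append, ih]
      simp [pfold]

theorem exact_div (c f : Int) (hf : 0 < f) :
    PySem.Int.floordiv (c * f) f = c := by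
  rw [PySem.Int.floordiv_eq_ediv_of_pos hf]
  exact Int.mul_ediv_cancel c (by omega)

theorem inner_eq (m : Int) (n : Nat) :
    PySem.Int.floordiv (pfold m n) (pyFactorial (n : Int))
    = if 1 ≤ m then (((m + (n : Int) - 1).toNat.choose n : Nat) : Int)
      else if m + (n : Int) ≤ 0 then (-1) ^ n * (((-m).toNat.choose n : Nat) : Int)
      else 0 := by
  have hfact : pyFactorial (n : Int) = ((Nat.factorial n : Nat) : Int) := by
    simp [pyFactorial]
  have hfpos : (0 : Int) < ((Nat.factorial n : Nat) : Int) := by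
    exact_mod_cast Nat.factorial_pos n
  by_cases hm : 1 ≤ m
  · rw [if_pos hm, hfact, pfold_pos m hm n]
    have h1 : m.toNat.ascFactorial n = Nat.factorial n * (m.toNat + n - 1).choose n :=
      Nat.ascFactorial_eq_factorial_mul_choose' _ _
    have h2 : (m + (n : Int) - 1).toNat = m.toNat + n - 1 := by omega
    rw [h1, h2]
    push_cast
    rw [mul_comm]
    exact exact_div _ _ hfpos
  · rw [if_neg hm]
    by_cases hmn : m + (n : Int) ≤ 0
    · rw [if_pos hmn, hfact, pfold_neg m n hmn]
      have h1 : (-m).toNat.descFactorial n = Nat.factorial n * (-m).toNat.choose n :=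
        Nat.descFactorial_eq_factorial_mul_choose _ _
      rw [h1]
      push_cast
      have : (-1 : Int) ^ n * (((Nat.factorial n : Nat) : Int) * (((-m).toNat.choose n : Nat) : Int))
          = ((-1) ^ n * (((-m).toNat.choose n : Nat) : Int)) * ((Nat.factorial n : Nat) : Int) := by
        ring
      rw [this]
      exact exact_div _ _ hfpos
    · rw [if_neg hmn]
      have hz : pfold m n = 0 := by
        refine pfold_zero_mem m n ⟨(-m).toNat, ?_, ?_⟩ <;> omega
      rw [hz, hfact]
      simp [PySem.Int.floordiv]

-- ===== VERDICT (by name: the statement is the Claim_ definition above) =====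
theorem h_at_m_spec : Claim_equal_h_at_m := by
  intro partition m _ hpre
  unfold Spec_h_at_m h_at_m h_at_m_alt
  apply PySem.List.foldl_congr_mem
  intro acc part hmem
  simp only
  obtain ⟨n, rfl⟩ : ∃ n : Nat, part = (n : Int) :=
    ⟨part.toNat, (Int.toNat_of_nonneg (hpre part hmem)).symm⟩
  rw [foldA, inner_eq m n]
  have hn : ((n : Int)).toNat = n := by omega
  split_ifs <;> simp [hn]
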